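-- pv_equiv track=rewrite | github.com/Jialin-Ye/Mapping-the-spontaneous-behavior-patterns-in-male-and-female-mice | Figure2_skeleton_kinematics/Figure2A_calculate_gaits.py | averageXYsquence
-- ===== SOURCE A (Python) =====
-- def averageXYsquence(peak_value,peak_gap,valley_value,valley_gap,num):
--
--     x_list = [0,]
--     y_list = [valley_value,]
--
--     x = 0
--     y = valley_value
--     for num in range(1,num):
--         if num%2 != 0:
--             x += peak_gap
--             y = peak_value
--             x_list.append(x)
--             y_list.append(y)
--         else:
--             x += valley_gap
--             y = valley_value
--             x_list.append(x)
--             y_list.append(y)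
--     return(x_list,y_list)
-- ===== SOURCE B (Python) =====
-- def averageXYsquence(peak_value, peak_gap, valley_value, valley_gap, num):
--     n = num if num > 1 else 1
--     x_list = [((i + 1) // 2) * peak_gap + (i // 2) * valley_gap for i in range(n)]
--     y_list = [valley_value if i % 2 == 0 else peak_value for i in range(n)]
--     return (x_list, y_list)
-- ===== Notes on version B (the rewrite author's own statement) =====
-- stated objective: simpler
-- what changed: Replaced the single interleaved accumulator loop carrying (x_list, y_list, x, y) by two independent comprehensions over range(n), with the running x replaced by an exact integer closed form ceil(i/2)*peak_gap + floor(i/2)*valley_gap.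
import Mathlib
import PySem

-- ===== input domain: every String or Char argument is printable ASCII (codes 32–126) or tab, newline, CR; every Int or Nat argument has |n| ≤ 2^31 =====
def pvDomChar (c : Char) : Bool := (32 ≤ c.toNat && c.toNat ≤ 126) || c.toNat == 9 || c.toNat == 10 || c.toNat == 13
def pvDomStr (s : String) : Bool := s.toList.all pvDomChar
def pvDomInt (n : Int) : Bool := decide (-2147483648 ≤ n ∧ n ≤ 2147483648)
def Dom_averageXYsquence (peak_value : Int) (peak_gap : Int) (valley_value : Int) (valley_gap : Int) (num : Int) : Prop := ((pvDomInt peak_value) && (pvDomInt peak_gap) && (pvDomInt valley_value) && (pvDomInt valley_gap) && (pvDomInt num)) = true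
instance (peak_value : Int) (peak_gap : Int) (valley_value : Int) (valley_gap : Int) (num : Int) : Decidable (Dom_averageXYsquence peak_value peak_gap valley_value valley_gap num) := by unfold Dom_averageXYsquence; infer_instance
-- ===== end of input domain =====

-- B replaces A's single interleaved accumulator loop by two independent index
-- comprehensions with a closed-form (exact, integer) x-position; objective: simpler.

-- ===== PORT A =====
-- literal transliteration of A: one fold carrying (x_list, y_list, x, y)
def averageXYsquence (peak_value : Int) (peak_gap : Int) (valley_value : Int) (valley_gap : Int) (num : Int) : List Int × List Int :=
  let r := (PySem.List.pyRange 1 num 1).foldl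
    (fun (s : List Int × List Int × Int × Int) n =>
      if PySem.Int.mod n 2 ≠ 0 then
        (s.1 ++ [s.2.2.1 + peak_gap], s.2.1 ++ [peak_value], s.2.2.1 + peak_gap, peak_value)
      else
        (s.1 ++ [s.2.2.1 + valley_gap], s.2.1 ++ [valley_value], s.2.2.1 + valley_gap, valley_value))
    ([0], [valley_value], 0, valley_value)
  (r.1, r.2.1)

-- ===== PORT B =====
-- literal transliteration of Source B: two comprehensions over range(n), closed-form x
def averageXYsquence_alt (peak_value : Int) (peak_gap : Int) (valley_value : Int) (valley_gap : Int) (num : Int) : List Int × List Int :=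
  let n : Int := if num > 1 then num else 1
  let x_list := (PySem.List.pyRange 0 n 1).map (fun i =>
    PySem.Int.floordiv (i + 1) 2 * peak_gap + PySem.Int.floordiv i 2 * valley_gap)
  let y_list := (PySem.List.pyRange 0 n 1).map (fun i =>
    if PySem.Int.mod i 2 = 0 then valley_value else peak_value)
  (x_list, y_list)

-- ===== PRECONDITION & SPEC =====
def Spec_averageXYsquence (peak_value : Int) (peak_gap : Int) (valley_value : Int) (valley_gap : Int) (num : Int) (out : List Int × List Int) : Prop := out = averageXYsquence_alt peak_value peak_gap valley_value valley_gap num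
instance (peak_value : Int) (peak_gap : Int) (valley_value : Int) (valley_gap : Int) (num : Int) (out : List Int × List Int) : Decidable (Spec_averageXYsquence peak_value peak_gap valley_value valley_gap num out) := by unfold Spec_averageXYsquence; infer_instance

-- ===== CLAIM (what is proved, stated in full; the proofs are below) =====
def Claim_equal_averageXYsquence : Prop := ∀ (peak_value : Int) (peak_gap : Int) (valley_value : Int) (valley_gap : Int) (num : Int), Dom_averageXYsquence peak_value peak_gap valley_value valley_gap num → Spec_averageXYsquence peak_value peak_gap valley_value valley_gap num (averageXYsquence peak_value peak_gap valley_value valley_gap num)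

-- ===== LEMMAS AND PROOFS =====

-- closed forms, indexed by a Nat
def pvX (pg vg : Int) (i : Nat) : Int := (((i + 1) / 2 : Nat) : Int) * pg + ((i / 2 : Nat) : Int) * vg
def pvY (pv vv : Int) (i : Nat) : Int := if i % 2 = 0 then vv else pv

lemma pvFoldA (pv pg vv vg : Int) (k : Nat) :
    (PySem.List.pyRange 1 ((k : Int) + 1) 1).foldl
      (fun (s : List Int × List Int × Int × Int) n =>
        if PySem.Int.mod n 2 ≠ 0 then
          (s.1 ++ [s.2.2.1 + pg], s.2.1 ++ [pv], s.2.2.1 + pg, pv)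
        else
          (s.1 ++ [s.2.2.1 + vg], s.2.1 ++ [vv], s.2.2.1 + vg, vv))
      ([0], [vv], 0, vv)
    = ((List.range (k + 1)).map (pvX pg vg), (List.range (k + 1)).map (pvY pv vv),
       pvX pg vg k, pvY pv vv k) := by
  induction k with
  | zero =>
      rw [show PySem.List.pyRange 1 ((0 : Nat) + 1 : Int) 1 = [] from by decide]
      simp [pvX, pvY]
  | succ k ih =>
      have h1 : ((k + 1 : Nat) : Int) + 1 = ((k : Int) + 1) + 1 := by push_cast; ring
      rw [h1, PySem.List.pyRange_one_succ_right (by omega), List.foldl_append, ih]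
      have hmod : PySem.Int.mod ((k : Int) + 1) 2 = ((k + 1) % 2 : Nat) := by
        exact_mod_cast PySem.Int.mod_natCast (k + 1) 2
      rcases Nat.even_or_odd (k + 1) with he | ho
      · have h2 : (k + 1) % 2 = 0 := Nat.even_iff.mp he
        simp only [List.foldl_cons, List.foldl_nil, hmod, h2]
        have hx : pvX pg vg (k + 1) = pvX pg vg k + vg := by
          have e1 : (k + 1 + 1) / 2 = (k + 1) / 2 := by omega
          have e2 : (k + 1) / 2 = k / 2 + 1 := by omega
          simp [pvX, e1, e2]; ring
        have hy : pvY pv vv (k + 1) = vv := by simp [pvY, h2]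
        simp [List.range_succ, hx, hy]
      · have h2 : (k + 1) % 2 = 1 := Nat.odd_iff.mp ho
        simp only [List.foldl_cons, List.foldl_nil, hmod, h2]
        have hx : pvX pg vg (k + 1) = pvX pg vg k + pg := by
          have e1 : (k + 1 + 1) / 2 = (k + 1) / 2 + 1 := by omega
          have e2 : (k + 1) / 2 = k / 2 := by omega
          simp [pvX, e1, e2]; ring
        have hy : pvY pv vv (k + 1) = pv := by simp [pvY, h2]
        simp [List.range_succ, hx, hy]

lemma pvAltEq (pv pg vv vg : Int) (m : Nat) (hm : 1 ≤ m) :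
    averageXYsquence_alt pv pg vv vg (m : Int)
    = ((List.range m).map (pvX pg vg), (List.range m).map (pvY pv vv)) := by
  simp only [averageXYsquence_alt]
  have hn : (if (m : Int) > 1 then (m : Int) else 1) = ((m : Nat) : Int) := by
    split <;> [rfl; (norm_num; omega)]
  rw [hn, PySem.List.pyRange_zero_natCast, List.map_map, List.map_map]
  simp only [Prod.mk.injEq]
  refine ⟨?_, ?_⟩ <;> (apply List.map_congr_left; intro i _)
  · show PySem.Int.floordiv ((i : Int) + 1) 2 * pg + PySem.Int.floordiv (i : Int) 2 * vg = _
    have c1 : ((i : Int) + 1) = ((i + 1 : Nat) : Int) := by push_cast; ring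
    rw [c1]
    rw [show (2 : Int) = ((2 : Nat) : Int) by norm_num,
        PySem.Int.floordiv_natCast, PySem.Int.floordiv_natCast]
    rfl
  · show (if PySem.Int.mod (i : Int) 2 = 0 then vv else pv) = pvY pv vv i
    have : PySem.Int.mod (i : Int) 2 = ((i % 2 : Nat) : Int) := by
      exact_mod_cast PySem.Int.mod_natCast i 2
    rw [this, pvY]
    rcases Nat.even_or_odd i with h | h
    · simp [Nat.even_iff.mp h]
    · simp [Nat.odd_iff.mp h]

-- ===== VERDICT (by name: the statement is the Claim_ definition above) =====
theorem averageXYsquence_spec : Claim_equal_averageXYsquence := by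
  intro pv pg vv vg num _
  unfold Spec_averageXYsquence
  by_cases h : 1 < num
  · -- num ≥ 2: write num = k + 1 with k = num.toNat - 1 ≥ 1
    obtain ⟨k, hk⟩ : ∃ k : Nat, num = (k : Int) + 1 := ⟨(num - 1).toNat, by omega⟩
    have hm : num = ((k + 1 : Nat) : Int) := by push_cast; omega
    rw [hm, pvAltEq pv pg vv vg (k + 1) (by omega)]
    unfold averageXYsquence
    rw [show ((k + 1 : Nat) : Int) = (k : Int) + 1 by push_cast; ring, pvFoldA]
  · -- num ≤ 1: A's loop body never runs, B produces one element
    have hr : PySem.List.pyRange 1 num 1 = [] := by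
      simp [PySem.List.pyRange]; omega
    unfold averageXYsquence averageXYsquence_alt
    rw [hr]
    simp only [if_neg h]
    rw [show PySem.List.pyRange 0 1 1 = [0] from by decide]
    simp [PySem.Int.floordiv, PySem.Int.mod]
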